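-- pv_equiv track=rewrite | github.com/qifanyyy/JupyterNotebook | new_algs/Sequence+algorithms/Smith-Waterman+algorithm/algs2.py | alignmentString
-- ===== SOURCE A (Python) =====
-- def alignmentString(alignedSeq1, alignedSeq2):
-- 	"""
-- 	this is a visualization of how well the sequences are aligned, we'll print this
-- 	same nucleotide is |, gaps are -, and mismatch is X
-- 	"""
-- 	idents, gaps, mismatches = 0,0,0 #initialization
-- 	alignmentString = []
-- 	A_SCORE = 0 #this will be the full score of the alignment
-- 	for base1, base2 in zip(alignedSeq1, alignedSeq2):
-- 		if base1 == base2: #if the bases are the same we show the match symbol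
-- 			alignmentString.append('|')
-- 			idents +=1
-- 		elif '-' in (base1, base2): #if there is a gap required we put in a space
-- 			alignmentString.append(' ')
-- 			gaps += 1
-- 		else:
-- 			alignmentString.append('X') #if they do not match but no gap put an X
-- 			mismatches += 1
--
-- 	return ''.join(alignmentString), idents, gaps, mismatches
-- ===== SOURCE B (Python) =====
-- def alignmentString(alignedSeq1, alignedSeq2):
-- 	"""
-- 	Patch-based reconstruction: start from an all-'X' (all-mismatch) buffer, then
-- 	run two correction passes over the indices -- first promote identical
-- 	positions to '|', then demote remaining 'X' positions involving a gap to
-- 	' '.  The mismatch count is never tallied: it is the arithmetic complement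
-- 	n - idents - gaps.
-- 	"""
-- 	n = min(len(alignedSeq1), len(alignedSeq2))
-- 	syms = ['X'] * n
-- 	idents = 0
-- 	for i in range(n):
-- 		if alignedSeq1[i] == alignedSeq2[i]:
-- 			syms[i] = '|'
-- 			idents += 1
-- 	gaps = 0
-- 	for i in range(n):
-- 		if syms[i] == 'X' and (alignedSeq1[i] == '-' or alignedSeq2[i] == '-'):
-- 			syms[i] = ' '
-- 			gaps += 1
-- 	return ''.join(syms), idents, gaps, n - idents - gaps
-- ===== Notes on version B (the rewrite author's own statement) =====
-- stated objective: alternative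
-- what changed: Replaces A's fused three-way classify-append-and-count loop with a patch-based reconstruction: an all-'X' buffer is corrected by two indexed passes (promote equal positions to '|', then demote gap-involving 'X' positions to ' '), and the mismatch count is never tallied but recovered as the arithmetic complement n - idents - gaps.
import Mathlib
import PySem

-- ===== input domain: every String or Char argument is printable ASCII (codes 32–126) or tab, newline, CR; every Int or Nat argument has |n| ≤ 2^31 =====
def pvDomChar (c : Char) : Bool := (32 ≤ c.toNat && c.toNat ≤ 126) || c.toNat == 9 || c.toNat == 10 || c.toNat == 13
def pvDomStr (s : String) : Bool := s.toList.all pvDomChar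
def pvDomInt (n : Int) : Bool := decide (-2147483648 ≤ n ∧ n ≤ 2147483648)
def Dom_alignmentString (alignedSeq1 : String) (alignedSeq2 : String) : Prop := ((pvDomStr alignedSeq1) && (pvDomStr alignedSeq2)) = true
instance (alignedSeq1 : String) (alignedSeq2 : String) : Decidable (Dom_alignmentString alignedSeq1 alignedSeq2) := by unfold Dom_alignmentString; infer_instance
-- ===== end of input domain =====

-- B rebuilds the visualization by patching: an all-'X' buffer corrected by two
-- indexed passes ('|' for equal positions, then ' ' for gap positions), with the
-- mismatch count recovered as the arithmetic complement n - idents - gaps,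
-- instead of A's fused classify-append-and-count loop; same cost, different algorithm.

-- ===== PORT A =====
def pvStepA (st : List Char × Int × Int × Int) (p : Char × Char) : List Char × Int × Int × Int :=
  if p.1 == p.2 then (st.1 ++ ['|'], st.2.1 + 1, st.2.2.1, st.2.2.2)
  else if p.1 == '-' || p.2 == '-' then (st.1 ++ [' '], st.2.1, st.2.2.1 + 1, st.2.2.2)
  else (st.1 ++ ['X'], st.2.1, st.2.2.1, st.2.2.2 + 1)

def alignmentString (alignedSeq1 : String) (alignedSeq2 : String) : String × Int × Int × Int :=
  let r := (alignedSeq1.toList.zip alignedSeq2.toList).foldl pvStepA ([], 0, 0, 0)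
  (String.ofList r.1, r.2.1, r.2.2.1, r.2.2.2)

-- ===== PORT B =====
-- range(n) with i always in [0, n): List.range n is exact; alignedSeq[i] with
-- 0 ≤ i < n ≤ len is in range, so getD with an arbitrary default is exact.
def pvStep1 (l1 l2 : List Char) (st : List Char × Int) (i : Nat) : List Char × Int :=
  if l1.getD i ' ' == l2.getD i ' ' then (st.1.set i '|', st.2 + 1) else st

def pvStep2 (l1 l2 : List Char) (st : List Char × Int) (i : Nat) : List Char × Int :=
  if st.1.getD i ' ' == 'X' && (l1.getD i ' ' == '-' || l2.getD i ' ' == '-') then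
    (st.1.set i ' ', st.2 + 1)
  else st

def alignmentString_alt (alignedSeq1 : String) (alignedSeq2 : String) : String × Int × Int × Int :=
  let l1 := alignedSeq1.toList
  let l2 := alignedSeq2.toList
  let n := min l1.length l2.length
  let st1 := (List.range n).foldl (pvStep1 l1 l2) (List.replicate n 'X', 0)
  let st2 := (List.range n).foldl (pvStep2 l1 l2) (st1.1, 0)
  (String.ofList st2.1, st1.2, st2.2, (n : Int) - st1.2 - st2.2)

-- ===== PRECONDITION & SPEC =====
def Spec_alignmentString (alignedSeq1 : String) (alignedSeq2 : String) (out : String × Int × Int × Int) : Prop := out = alignmentString_alt alignedSeq1 alignedSeq2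
instance (alignedSeq1 : String) (alignedSeq2 : String) (out : String × Int × Int × Int) : Decidable (Spec_alignmentString alignedSeq1 alignedSeq2 out) := by unfold Spec_alignmentString; infer_instance

-- ===== CLAIM (what is proved, stated in full; the proofs are below) =====
def Claim_equal_alignmentString : Prop := ∀ (alignedSeq1 : String) (alignedSeq2 : String), Dom_alignmentString alignedSeq1 alignedSeq2 → Spec_alignmentString alignedSeq1 alignedSeq2 (alignmentString alignedSeq1 alignedSeq2)

-- ===== LEMMAS AND PROOFS =====

-- the two pointwise symbol functions
def pvF1 (p : Char × Char) : Char := if p.1 == p.2 then '|' else 'X'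
def pvSym (p : Char × Char) : Char :=
  if p.1 == p.2 then '|' else if p.1 == '-' || p.2 == '-' then ' ' else 'X'

-- A's fused loop computes (map pvSym, the three symbol counts)
theorem pvLoopA_eq (l : List (Char × Char)) (acc : List Char) (i g m : Int) :
    l.foldl pvStepA (acc, i, g, m) =
      (acc ++ l.map pvSym,
        i + (l.map pvSym).count '|',
        g + (l.map pvSym).count ' ',
        m + (l.map pvSym).count 'X') := by
  induction l generalizing acc i g m with
  | nil => simp
  | cons h t ih =>
    simp only [List.foldl_cons, List.map_cons]
    by_cases h1 : h.1 == h.2 <;> by_cases h2 : h.1 == '-' || h.2 == '-' <;>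
      simp [pvStepA, pvSym, h1, h2, ih] <;> omega

theorem pvSetAt {a : List Char} (c x : Char) (r : List Char) (i : Nat)
    (hi : i = a.length) : (a ++ c :: r).set i x = a ++ x :: r := by
  subst hi
  induction a with
  | nil => simp
  | cons h t ih => simp [ih]

theorem pvPass1_eq (l1 l2 : List Char) (k : Nat)
    (hk : k ≤ min l1.length l2.length) :
    (List.range k).foldl (pvStep1 l1 l2)
        (List.replicate (min l1.length l2.length) 'X', 0) =
      (((l1.zip l2).take k).map pvF1 ++
         List.replicate (min l1.length l2.length - k) 'X',
       ((((l1.zip l2).take k).map pvF1).count '|' : Int)) := by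
  induction k with
  | zero => simp
  | succ k ih =>
    have hk' : k ≤ min l1.length l2.length := Nat.le_of_succ_le hk
    have hklt : k < min l1.length l2.length := hk
    have hz : (l1.zip l2).length = min l1.length l2.length := List.length_zip
    have hkz : k < (l1.zip l2).length := by omega
    rw [List.range_succ, List.foldl_append, ih hk']
    have htake : (l1.zip l2).take (k + 1) =
        (l1.zip l2).take k ++ [(l1.zip l2)[k]] := by
      rw [List.take_add_one]
      simp [List.getElem?_eq_getElem hkz]
    have hlen : (((l1.zip l2).take k).map pvF1).length = k := by
      simp [List.length_take, hz]; omega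
    have hget1 : l1.getD k ' ' = ((l1.zip l2)[k]).1 := by
      have h1 : k < l1.length := by omega
      have h2 : k < l2.length := by omega
      simp [List.getD, List.getElem?_eq_getElem h1, List.getElem_zip]
    have hget2 : l2.getD k ' ' = ((l1.zip l2)[k]).2 := by
      have h1 : k < l1.length := by omega
      have h2 : k < l2.length := by omega
      simp [List.getD, List.getElem?_eq_getElem h2, List.getElem_zip]
    have hrep : List.replicate (min l1.length l2.length - k) 'X' =
        'X' :: List.replicate (min l1.length l2.length - (k + 1)) 'X' := by
      have : min l1.length l2.length - k =
          (min l1.length l2.length - (k + 1)) + 1 := by omega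
      rw [this, List.replicate_succ]
    simp only [List.foldl_cons, List.foldl_nil, pvStep1, hget1, hget2, htake]
    by_cases he : ((l1.zip l2)[k]).1 == ((l1.zip l2)[k]).2
    · rw [if_pos he, hrep, pvSetAt _ _ _ _ hlen.symm]
      simp only [List.getElem_zip, beq_iff_eq] at he
      simp [pvF1, List.count_append, he]
    · rw [if_neg he, hrep]
      simp only [List.getElem_zip, beq_iff_eq] at he
      simp [pvF1, List.count_append, he]

theorem pvPass2_eq (l1 l2 : List Char) (k : Nat)
    (hk : k ≤ min l1.length l2.length) :
    (List.range k).foldl (pvStep2 l1 l2) ((l1.zip l2).map pvF1, 0) =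
      (((l1.zip l2).take k).map pvSym ++ ((l1.zip l2).drop k).map pvF1,
       ((((l1.zip l2).take k).map pvSym).count ' ' : Int)) := by
  induction k with
  | zero => simp
  | succ k ih =>
    have hk' : k ≤ min l1.length l2.length := Nat.le_of_succ_le hk
    have hz : (l1.zip l2).length = min l1.length l2.length := List.length_zip
    have hkz : k < (l1.zip l2).length := by omega
    have htake : (l1.zip l2).take (k + 1) =
        (l1.zip l2).take k ++ [(l1.zip l2)[k]] := by
      rw [List.take_add_one]; simp [List.getElem?_eq_getElem hkz]
    have hdrop : (l1.zip l2).drop k = (l1.zip l2)[k] :: (l1.zip l2).drop (k + 1) :=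
      (List.drop_eq_getElem_cons hkz)
    have hlen : (((l1.zip l2).take k).map pvSym).length = k := by
      simp [List.length_take, hz]; omega
    have hget1 : l1.getD k ' ' = ((l1.zip l2)[k]).1 := by
      have h1 : k < l1.length := by omega
      simp [List.getD, List.getElem?_eq_getElem h1, List.getElem_zip]
    have hget2 : l2.getD k ' ' = ((l1.zip l2)[k]).2 := by
      have h2 : k < l2.length := by omega
      simp [List.getD, List.getElem?_eq_getElem h2, List.getElem_zip]
    have hgetS : (((l1.zip l2).take k).map pvSym ++
        ((l1.zip l2).drop k).map pvF1).getD k ' ' = pvF1 ((l1.zip l2)[k]) := by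
      rw [hdrop, List.map_cons, List.getD,
        List.getElem?_append_right (by omega : (((l1.zip l2).take k).map pvSym).length ≤ k),
        hlen, Nat.sub_self]
      simp
    rw [List.range_succ, List.foldl_append, ih hk', List.foldl_cons, List.foldl_nil]
    simp only [pvStep2, hgetS, hget1, hget2]
    by_cases he : ((l1.zip l2)[k]).1 == ((l1.zip l2)[k]).2
    · simp only [List.getElem_zip, beq_iff_eq] at he
      rw [if_neg (by simp [pvF1, he]), htake, hdrop]
      simp [pvSym, pvF1, List.count_append, he]
    · simp only [List.getElem_zip, beq_iff_eq] at he
      by_cases hg : ((l1.zip l2)[k]).1 == '-' || ((l1.zip l2)[k]).2 == '-'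
      · simp only [List.getElem_zip, Bool.or_eq_true, beq_iff_eq] at hg
        rw [if_pos (by simp [pvF1, he]; simpa using hg), hdrop, List.map_cons,
          pvSetAt _ _ _ _ hlen.symm, htake]
        simp [pvSym, List.count_append, he, hg]
      · simp only [List.getElem_zip, Bool.or_eq_true, beq_iff_eq, not_or] at hg
        rw [if_neg (by simp [pvF1, he, hg.1, hg.2]), htake, hdrop]
        simp [pvSym, pvF1, List.count_append, he, hg.1, hg.2]

-- the '|' count is the same whether gaps have been resolved or not
theorem pvCount_ident (l : List (Char × Char)) :
    (l.map pvF1).count '|' = (l.map pvSym).count '|' := by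
  induction l with
  | nil => rfl
  | cons h t ih =>
    by_cases h1 : h.1 == h.2 <;> by_cases h2 : h.1 == '-' || h.2 == '-' <;>
      simp [pvF1, pvSym, h1, h2, ih]

-- each position carries exactly one of the three symbols
theorem pvCount_sum (l : List (Char × Char)) :
    ((l.map pvSym).count '|' : Int) + (l.map pvSym).count ' ' +
      (l.map pvSym).count 'X' = l.length := by
  induction l with
  | nil => simp
  | cons h t ih =>
    by_cases h1 : h.1 == h.2 <;> by_cases h2 : h.1 == '-' || h.2 == '-' <;>
      simp [pvSym, h1, h2] <;> omega

-- ===== VERDICT (by name: the statement is the Claim_ definition above) =====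
theorem alignmentString_spec : Claim_equal_alignmentString := by
  intro s1 s2 _
  unfold Spec_alignmentString alignmentString alignmentString_alt
  have hz : (s1.toList.zip s2.toList).length = min s1.toList.length s2.toList.length :=
    List.length_zip
  have ht : (s1.toList.zip s2.toList).take (min s1.toList.length s2.toList.length) =
      s1.toList.zip s2.toList := by rw [← hz]; exact List.take_length
  have hd : (s1.toList.zip s2.toList).drop (min s1.toList.length s2.toList.length) = [] := by
    rw [← hz]; exact List.drop_length
  have hs := pvCount_sum (s1.toList.zip s2.toList)
  simp only [pvLoopA_eq, pvPass1_eq s1.toList s2.toList _ (le_refl _),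
    pvPass2_eq s1.toList s2.toList _ (le_refl _), ht, hd, List.map_nil, List.append_nil,
    Nat.sub_self, List.replicate_zero, List.nil_append, zero_add, Prod.mk.injEq]
  have hc := pvCount_ident (s1.toList.zip s2.toList)
  refine ⟨trivial, ?_, trivial, ?_⟩ <;> rw [hz] at hs <;> omega
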